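-- pv_equiv track=rewrite | github.com/starfish-studios/Another-Furniture-Mod | generate.py | material_names
-- ===== SOURCE A (Python) =====
-- def material_names(item_name):
--     material_type = "WOOD"
--     for wood_type in wood_types:
--         if wood_type.split(":")[1] in item_name:
--             material_type = "WOOD"
--             for non_flammable_wood in non_flammable_woods:
--                 if non_flammable_wood in item_name:
--                     return "NETHER_WOOD"
--
--     if item_name.endswith("stool"):
--         material_type = "WOOD"
--     return material_type
--
-- wood_types = [
--     "minecraft:oak", "minecraft:spruce", "minecraft:birch", "minecraft:jungle", "minecraft:acacia",
--     "minecraft:dark_oak", "minecraft:crimson", "minecraft:warped", "quark:azalea", "quark:blossom",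
--     "ecologics:azalea", "ecologics:coconut", "ecologics:walnut"
-- ]
--
-- non_flammable_woods = [
--     "crimson", "warped"
-- ]
-- ===== SOURCE B (Python) =====
-- def material_names(item_name):
--     # NETHER_WOOD is returned exactly when item_name contains "crimson" or "warped":
--     # either substring guarantees the outer wood-type match, and no other wood type
--     # can trigger the inner return.
--     if "crimson" in item_name or "warped" in item_name:
--         return "NETHER_WOOD"
--     return "WOOD"
-- ===== Notes on version B (the rewrite author's own statement) =====
-- stated objective: simpler
-- what changed: Replaced the nested scan over the 13 wood types and 2 non-flammable woods by a direct two-substring test: NETHER_WOOD iff item_name contains 'crimson' or 'warped' (each such occurrence itself satisfies the outer wood-type match), else WOOD.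
import Mathlib
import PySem

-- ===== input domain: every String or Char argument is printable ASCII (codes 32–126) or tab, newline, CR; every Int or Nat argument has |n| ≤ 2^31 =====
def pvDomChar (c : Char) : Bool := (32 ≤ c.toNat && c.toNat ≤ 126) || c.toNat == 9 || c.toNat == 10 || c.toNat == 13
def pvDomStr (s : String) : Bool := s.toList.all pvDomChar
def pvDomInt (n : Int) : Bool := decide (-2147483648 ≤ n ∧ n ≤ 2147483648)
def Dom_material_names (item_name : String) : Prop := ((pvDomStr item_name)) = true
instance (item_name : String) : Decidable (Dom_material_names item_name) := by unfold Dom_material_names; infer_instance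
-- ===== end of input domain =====

-- B replaces A's nested scans over the constant wood lists by a direct two-substring
-- classification (objective: simpler); proved equal to A on every string.

-- ===== PORT A =====
def pvWoodTypes : List String :=
  ["minecraft:oak", "minecraft:spruce", "minecraft:birch", "minecraft:jungle", "minecraft:acacia",
   "minecraft:dark_oak", "minecraft:crimson", "minecraft:warped", "quark:azalea", "quark:blossom",
   "ecologics:azalea", "ecologics:coconut", "ecologics:walnut"]

def pvNonFlammableWoods : List String := ["crimson", "warped"]

-- wood_type.split(":")[1]; exact on every element of pvWoodTypes (":" present, index 1 in range)
def pvWoodPart (w : String) : String :=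
  (PySem.List.pyGet? ((PySem.Str.split? w ":").getD []) 1).getD ""

-- inner loop: for non_flammable_wood in non_flammable_woods: if … in item_name: return "NETHER_WOOD"
def pvInnerA (s : String) : List String → Option String
  | [] => none
  | n :: rest => if PySem.Str.isIn n s then some "NETHER_WOOD" else pvInnerA s rest

-- outer loop over wood_types (the inner `return` propagates as `some`)
def pvOuterA (s : String) : List String → Option String
  | [] => none
  | w :: rest =>
      if PySem.Str.isIn (pvWoodPart w) s then
        match pvInnerA s pvNonFlammableWoods with
        | some r => some r
        | none => pvOuterA s rest
      else pvOuterA s rest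

def material_names (item_name : String) : String :=
  match pvOuterA item_name pvWoodTypes with
  | some r => r
  | none =>
      -- material_type is "WOOD" on every path that reaches here; the final if re-assigns "WOOD"
      if PySem.Str.endswith item_name "stool" then "WOOD" else "WOOD"

-- ===== PORT B =====
def material_names_alt (item_name : String) : String :=
  if PySem.Str.isIn "crimson" item_name || PySem.Str.isIn "warped" item_name then "NETHER_WOOD"
  else "WOOD"

-- ===== PRECONDITION & SPEC =====
def Spec_material_names (item_name : String) (out : String) : Prop := out = material_names_alt item_name
instance (item_name : String) (out : String) : Decidable (Spec_material_names item_name out) := by unfold Spec_material_names; infer_instance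

-- ===== CLAIM (what is proved, stated in full; the proofs are below) =====
def Claim_equal_material_names : Prop := ∀ (item_name : String), Dom_material_names item_name → Spec_material_names item_name (material_names item_name)

-- ===== LEMMAS AND PROOFS =====

theorem pvOuterA_some {s v : String} (h : pvInnerA s pvNonFlammableWoods = some v) :
    ∀ ws : List String, (∃ w ∈ ws, PySem.Chars.isIn (pvWoodPart w).toList s.toList = true) →
      pvOuterA s ws = some v := by
  intro ws
  induction ws with
  | nil => rintro ⟨w, hw, -⟩; simp at hw
  | cons w rest ih =>
      rintro ⟨x, hx, hxi⟩
      by_cases hm : PySem.Chars.isIn (pvWoodPart w).toList s.toList = true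
      · simp [pvOuterA, hm, h]
      · rcases List.mem_cons.mp hx with rfl | hx'
        · exact absurd hxi hm
        · simp only [pvOuterA]
          rw [if_neg (by simpa using hm)]
          exact ih ⟨x, hx', hxi⟩

theorem pvOuterA_none {s : String} (h : pvInnerA s pvNonFlammableWoods = none) :
    ∀ ws : List String, pvOuterA s ws = none := by
  intro ws
  induction ws with
  | nil => rfl
  | cons w rest ih => simp [pvOuterA, h, ih]

theorem pvCrimsonList : "crimson".toList = ['c','r','i','m','s','o','n'] := rfl

theorem pvWarpedList : "warped".toList = ['w','a','r','p','e','d'] := rfl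

theorem material_names_eq_alt (s : String) : material_names s = material_names_alt s := by
  by_cases hc : PySem.Chars.isIn ['c','r','i','m','s','o','n'] s.toList = true
  · have hin : pvInnerA s pvNonFlammableWoods = some "NETHER_WOOD" := by
      simp [pvInnerA, pvNonFlammableWoods, pvCrimsonList, hc]
    have hpart : pvWoodPart "minecraft:crimson" = "crimson" := rfl
    have houter : pvOuterA s pvWoodTypes = some "NETHER_WOOD" :=
      pvOuterA_some hin _ ⟨"minecraft:crimson", by simp [pvWoodTypes],
        by rw [hpart, pvCrimsonList]; exact hc⟩
    simp [material_names, material_names_alt, houter, hc]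
  · by_cases hw : PySem.Chars.isIn ['w','a','r','p','e','d'] s.toList = true
    · have hin : pvInnerA s pvNonFlammableWoods = some "NETHER_WOOD" := by
        simp [pvInnerA, pvNonFlammableWoods, pvCrimsonList, pvWarpedList, hc, hw]
      have hpart : pvWoodPart "minecraft:warped" = "warped" := rfl
      have houter : pvOuterA s pvWoodTypes = some "NETHER_WOOD" :=
        pvOuterA_some hin _ ⟨"minecraft:warped", by simp [pvWoodTypes],
          by rw [hpart, pvWarpedList]; exact hw⟩
      simp [material_names, material_names_alt, houter, hc, hw]
    · have hin : pvInnerA s pvNonFlammableWoods = none := by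
        simp [pvInnerA, pvNonFlammableWoods, pvCrimsonList, pvWarpedList, hc, hw]
      simp [material_names, material_names_alt, pvOuterA_none hin, hc, hw]

-- ===== VERDICT (by name: the statement is the Claim_ definition above) =====
theorem material_names_spec : Claim_equal_material_names := by
  intro s _
  exact material_names_eq_alt s
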